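-- pv_equiv track=rewrite | github.com/bpeak/practice-algo | 이상한문자만들기.py | solution
-- ===== SOURCE A (Python) =====
-- def solution(str):
--     result = ""
--     idx = 0
--     for c in str:
--         if c == " ":
--             idx = 0
--         else:
--             if idx % 2 == 0:
--                 c = c.upper()
--             else:
--                 c = c.lower()
--             idx += 1
--         result += c
--     return result
-- ===== SOURCE B (Python) =====
-- def solution(str):
--     words = str.split(" ")
--     out = []
--     for word in words:
--         out.append("".join(ch.upper() if i % 2 == 0 else ch.lower() for i, ch in enumerate(word)))
--     return " ".join(out)
-- ===== Notes on version B (the rewrite author's own statement) =====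
-- stated objective: idiomatic
-- what changed: Replaces the single running-index character scan with a space-delimited split, a per-word enumerate transform, and a rejoin that preserves all original spacing.
import Mathlib
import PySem

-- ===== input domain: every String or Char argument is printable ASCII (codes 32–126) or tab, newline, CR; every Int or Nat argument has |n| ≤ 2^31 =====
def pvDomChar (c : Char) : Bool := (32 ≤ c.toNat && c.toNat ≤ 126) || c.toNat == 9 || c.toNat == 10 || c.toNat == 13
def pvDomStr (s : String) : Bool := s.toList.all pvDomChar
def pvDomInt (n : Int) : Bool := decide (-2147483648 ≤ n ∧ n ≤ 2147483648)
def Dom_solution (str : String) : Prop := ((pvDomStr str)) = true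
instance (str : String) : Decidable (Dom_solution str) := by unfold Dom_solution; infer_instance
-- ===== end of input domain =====

-- B splits on " ", transforms each word by its own enumerate index, and rejoins with " "
-- instead of A's running-index scan reset at spaces (idiomatic decomposition, same cost).

-- ===== PORT A =====
-- the for-loop over the characters, carrying Python's running `idx`
def solutionGo : List Char → Int → List Char
  | [], _ => []
  | c :: rest, idx =>
    if c = ' ' then c :: solutionGo rest 0
    else (if PySem.Int.mod idx 2 = 0 then PySem.Chars.upperChar c
           else PySem.Chars.lowerChar c) :: solutionGo rest (idx + 1)

def solution (str : String) : String := String.ofList (solutionGo str.toList 0)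

-- ===== PORT B =====
-- port of the inner genexp: ch.upper() at even enumerate index, ch.lower() at odd
def transformWord (w : List Char) : List Char :=
  (PySem.List.enumerate w).map
    (fun p => if PySem.Int.mod p.1 2 = 0 then PySem.Chars.upperChar p.2
              else PySem.Chars.lowerChar p.2)

def solution_alt (str : String) : String :=
  String.ofList (PySem.Chars.join [' '] ((PySem.Chars.splitOn str.toList [' ']).map transformWord))

-- ===== PRECONDITION & SPEC =====
def Spec_solution (str : String) (out : String) : Prop := out = solution_alt str
instance (str : String) (out : String) : Decidable (Spec_solution str out) := by unfold Spec_solution; infer_instance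

-- ===== CLAIM (what is proved, stated in full; the proofs are below) =====
def Claim_equal_solution : Prop := ∀ (str : String), Dom_solution str → Spec_solution str (solution str)

-- ===== LEMMAS AND PROOFS =====

-- a structural description of splitting on a single space
def spSplit : List Char → List (List Char)
  | [] => [[]]
  | c :: cs =>
    if c = ' ' then [] :: spSplit cs
    else match spSplit cs with
      | [] => [[c]]
      | w :: ws => (c :: w) :: ws

theorem spSplit_ne_nil (cs : List Char) : spSplit cs ≠ [] := by
  cases cs with
  | nil => simp [spSplit]
  | cons c cs =>
    simp only [spSplit]
    split
    · simp
    · split <;> simp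

theorem splitOn_go_spec (fuel : Nat) (l cur : List Char) (acc : List (List Char))
    (h : l.length < fuel) :
    PySem.Chars.splitOn.go [' '] fuel l cur acc
      = acc.reverse ++ (spSplit l).modifyHead (cur.reverse ++ ·) := by
  induction fuel generalizing l cur acc with
  | zero => omega
  | succ fuel ih =>
    cases l with
    | nil => simp [PySem.Chars.splitOn.go, spSplit]
    | cons c rest =>
      by_cases hc : c = ' '
      · subst hc
        simp only [PySem.Chars.splitOn.go, List.isPrefixOf, BEq.rfl, Bool.true_and, if_true,
          List.length_cons, List.drop_succ_cons, List.drop_zero, List.length_nil]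
        rw [ih rest [] (cur.reverse :: acc) (by simpa using Nat.lt_of_succ_lt_succ h)]
        simp [spSplit]
        cases spSplit rest <;> simp
      · have hpre : [' '].isPrefixOf (c :: rest) = false := by
          simp [List.isPrefixOf]; exact fun h' => (hc h'.symm).elim
        simp only [PySem.Chars.splitOn.go, hpre, Bool.false_eq_true, if_false]
        rw [ih rest (c :: cur) acc (by simpa using Nat.lt_of_succ_lt_succ h)]
        have hne := spSplit_ne_nil rest
        obtain ⟨w, ws, hw⟩ := List.exists_cons_of_ne_nil hne
        simp [spSplit, hc, hw]

theorem splitOn_eq_spSplit (cs : List Char) :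
    PySem.Chars.splitOn cs [' '] = spSplit cs := by
  unfold PySem.Chars.splitOn
  rw [splitOn_go_spec cs.length.succ cs [] [] (Nat.lt_succ_self _)]
  have := spSplit_ne_nil cs
  obtain ⟨w, ws, hw⟩ := List.exists_cons_of_ne_nil this
  simp [hw]

-- the per-word transform started at an arbitrary index
def fidx (idx : Int) (w : List Char) : List Char :=
  (PySem.List.enumerate w idx).map
    (fun p => if PySem.Int.mod p.1 2 = 0 then PySem.Chars.upperChar p.2
              else PySem.Chars.lowerChar p.2)

theorem transformWord_eq_fidx (w : List Char) : transformWord w = fidx 0 w := rfl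

theorem fidx_cons (idx : Int) (c : Char) (w : List Char) :
    fidx idx (c :: w)
      = (if PySem.Int.mod idx 2 = 0 then PySem.Chars.upperChar c
         else PySem.Chars.lowerChar c) :: fidx (idx + 1) w := by
  simp [fidx, PySem.List.enumerate_cons]

theorem join_cons_head (x : Char) (l : List Char) (rest : List (List Char)) :
    PySem.Chars.join [' '] ((x :: l) :: rest) = x :: PySem.Chars.join [' '] (l :: rest) := by
  cases rest with
  | nil => simp [PySem.Chars.join_singleton]
  | cons r rs => simp [PySem.Chars.join_cons_cons]

theorem solutionGo_eq_join (cs : List Char) :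
    ∀ (idx : Int) (w : List Char) (ws : List (List Char)), spSplit cs = w :: ws →
      solutionGo cs idx = PySem.Chars.join [' '] (fidx idx w :: ws.map (fidx 0)) := by
  induction cs with
  | nil =>
    intro idx w ws h
    simp [spSplit] at h
    obtain ⟨hw, hws⟩ := h
    subst hw; subst hws
    simp [solutionGo, fidx, PySem.List.enumerate, PySem.Chars.join_singleton]
  | cons c cs ih =>
    intro idx w ws h
    by_cases hc : c = ' '
    · subst hc
      simp [spSplit] at h
      obtain ⟨hw, hws⟩ := h
      subst hw
      obtain ⟨w', ws', hw'⟩ := List.exists_cons_of_ne_nil (spSplit_ne_nil cs)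
      rw [hw'] at hws
      subst hws
      simp only [solutionGo, if_true]
      rw [ih 0 w' ws' hw']
      simp [fidx, PySem.List.enumerate, PySem.Chars.join_cons_cons]
    · obtain ⟨w', ws', hw'⟩ := List.exists_cons_of_ne_nil (spSplit_ne_nil cs)
      rw [spSplit.eq_def] at h
      simp only [hc, if_false] at h
      rw [hw'] at h
      simp at h
      obtain ⟨hw, hws⟩ := h
      subst hw; subst hws
      simp only [solutionGo, hc, if_false]
      rw [ih (idx + 1) w' ws' hw', fidx_cons, join_cons_head]

-- ===== VERDICT (by name: the statement is the Claim_ definition above) =====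
theorem solution_spec : Claim_equal_solution := by
  intro str _
  unfold Spec_solution solution solution_alt
  rw [splitOn_eq_spSplit]
  obtain ⟨w, ws, hw⟩ := List.exists_cons_of_ne_nil (spSplit_ne_nil str.toList)
  rw [hw, List.map_cons, transformWord_eq_fidx,
    solutionGo_eq_join str.toList 0 w ws hw]
  congr 1
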